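-- pv_equiv track=rewrite | github.com/SubZer0811/BE2SIM | be2sim.py | generate
-- ===== SOURCE A (Python) =====
-- length = 2
--
-- width = 4
--
-- def generate (post_exp):
--
-- 	stack = []
-- 	network = []
-- 	node_counter = 1
-- 	out_counter = 1
--
-- 	# type gate source drain length width
-- 	for i in post_exp:
--
-- 		if(i == '+' or i == '!' or i == '.'):
-- 			if(i == '+'):
-- 				gate1 = ['p', stack[-2], 'vdd', node_counter, length, width]
-- 				gate2 = ['p', stack[-1], node_counter, 'out'+str(out_counter), length, width]
-- 				gate3 = ['n', stack[-2], 'out'+str(out_counter), 'gnd', length, width]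
-- 				gate4 = ['n', stack[-1], 'out'+str(out_counter), 'gnd', length, width]
-- 				network.append(gate1); network.append(gate2); network.append(gate3); network.append(gate4)
--
-- 				gate5 = ['p', 'out'+str(out_counter), 'vdd', 'out'+str(out_counter+1), length, width]
-- 				gate6 = ['n', 'out'+str(out_counter), 'out'+str(out_counter+1), 'gnd', length, width]
-- 				network.append(gate5); network.append(gate6)
--
-- 				stack.pop(); stack.pop()
-- 				stack.append('out'+str(out_counter+1))
--
-- 				out_counter += 2
-- 				node_counter += 1
--
-- 			if(i == '.'):
-- 				gate1 = ['p', stack[-2], 'vdd', 'out'+str(out_counter), length, width]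
-- 				gate2 = ['p', stack[-1], 'vdd', 'out'+str(out_counter), length, width]
-- 				gate3 = ['n', stack[-2], 'out'+str(out_counter), node_counter, length, width]
-- 				gate4 = ['n', stack[-1], node_counter, 'gnd', length, width]
-- 				network.append(gate1); network.append(gate2); network.append(gate3); network.append(gate4)
--
-- 				gate5 = ['p', 'out'+str(out_counter), 'vdd', 'out'+str(out_counter+1), length, width]
-- 				gate6 = ['n', 'out'+str(out_counter), 'out'+str(out_counter+1), 'gnd', length, width]
-- 				network.append(gate5); network.append(gate6)
-- 				stack.pop(); stack.pop()
-- 				stack.append('out'+str(out_counter+1))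
--
-- 				out_counter += 2
-- 				node_counter += 1
--
-- 			if(i == '!'):
--
-- 				gate = stack[-1]
--
-- 				gate1 = ['p', gate, 'vdd', 'out'+str(out_counter+1), length, width]
-- 				gate2 = ['n', gate, 'out'+str(out_counter+1), 'gnd', length, width]
-- 				network.append(gate1); network.append(gate2)
-- 				stack.pop()
--
-- 				stack.append('out'+str(out_counter+1))
--
-- 				out_counter += 2
--
-- 		else:
-- 			stack.append(i)
--
-- 	# out = int(stack[0][3:])
--
-- 	for i in range(len(network)):
-- 		if(network[i][3] == stack[0]):
-- 			network[i][3] = 'out'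
-- 		if(network[i][2] == stack[0]):
-- 			network[i][2] = 'out'
--
-- 		network[i] = ' '.join([str(n) for n in network[i]]) + '\n'
--
-- 	return network
-- ===== SOURCE B (Python) =====
-- length = 2
--
-- width = 4
--
-- def generate(post_exp):
--     # B: parse the postfix tokens into a forest of expression trees, then emit
--     # gates by a post-order walk threading the two counters (alternative decomposition).
--     stack = []
--     for t in post_exp:
--         if t == '+' or t == '.':
--             b = stack.pop(); a = stack.pop()
--             stack.append((t, a, b))
--         elif t == '!':
--             a = stack.pop()
--             stack.append(('!', a))
--         else:
--             stack.append(t)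
--
--     network = []
--
--     def emit(node, nc, oc):
--         # returns (output name, node_counter, out_counter) after emitting node's gates
--         if isinstance(node, str):
--             return node, nc, oc
--         if node[0] == '!':
--             x, nc, oc = emit(node[1], nc, oc)
--             o = 'out' + str(oc + 1)
--             network.append(['p', x, 'vdd', o, length, width])
--             network.append(['n', x, o, 'gnd', length, width])
--             return o, nc, oc + 2
--         x, nc, oc = emit(node[1], nc, oc)
--         y, nc, oc = emit(node[2], nc, oc)
--         o1 = 'out' + str(oc); o2 = 'out' + str(oc + 1)
--         if node[0] == '+':
--             network.extend([['p', x, 'vdd', nc, length, width],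
--                             ['p', y, nc, o1, length, width],
--                             ['n', x, o1, 'gnd', length, width],
--                             ['n', y, o1, 'gnd', length, width]])
--         else:
--             network.extend([['p', x, 'vdd', o1, length, width],
--                             ['p', y, 'vdd', o1, length, width],
--                             ['n', x, o1, nc, length, width],
--                             ['n', y, nc, 'gnd', length, width]])
--         network.extend([['p', o1, 'vdd', o2, length, width],
--                         ['n', o1, o2, 'gnd', length, width]])
--         return o2, nc + 1, oc + 2
--
--     nc, oc = 1, 1
--     names = []
--     for tree in stack:
--         name, nc, oc = emit(tree, nc, oc)
--         names.append(name)
--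
--     if not network:
--         return []
--     final = names[0]
--
--     def line(g):
--         d = 'out' if g[3] == final else g[3]
--         s = 'out' if g[2] == final else g[2]
--         return ' '.join(str(v) for v in [g[0], g[1], s, d, g[4], g[5]]) + '\n'
--
--     return [line(g) for g in network]
-- ===== Notes on version B (the rewrite author's own statement) =====
-- stated objective: alternative
-- what changed: B parses the postfix tokens into a forest of expression trees and emits the gate netlist by a post-order tree walk threading the two counters, instead of A's single linear scan that emits gates inline off a string stack.
import Mathlib
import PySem

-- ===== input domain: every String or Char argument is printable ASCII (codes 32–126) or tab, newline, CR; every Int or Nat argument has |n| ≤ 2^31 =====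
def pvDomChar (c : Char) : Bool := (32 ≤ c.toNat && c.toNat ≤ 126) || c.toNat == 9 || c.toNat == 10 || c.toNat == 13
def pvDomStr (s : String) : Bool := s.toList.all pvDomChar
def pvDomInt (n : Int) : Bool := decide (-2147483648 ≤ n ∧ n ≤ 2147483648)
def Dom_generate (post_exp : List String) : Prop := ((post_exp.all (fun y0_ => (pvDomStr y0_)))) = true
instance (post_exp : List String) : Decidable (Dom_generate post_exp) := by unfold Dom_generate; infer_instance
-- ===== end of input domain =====

-- B re-decomposes A's linear scan as: parse the postfix tokens into a forest of
-- expression trees, then emit the same gates by a post-order walk threading the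
-- two counters (objective: alternative decomposition, same cost).

-- Shared vocabulary of both ports: a netlist row holds strings and ints
-- (Python keeps them in a 6-element list; fields are type gate source drain length width).
inductive Atom
  | s : String → Atom
  | i : Int → Atom
deriving DecidableEq, Repr

structure Gate where
  typ : String
  gate : String
  source : Atom
  drain : Atom
  len : Int
  wid : Int
deriving DecidableEq, Repr

def outName (k : Int) : String := "out" ++ PySem.Int.toStr k

-- the six-gate template of '+' (gates 1–6 in A's order)
def gatesPlus (a b : String) (nc oc : Int) : List Gate :=
  [⟨"p", a, Atom.s "vdd", Atom.i nc, 2, 4⟩,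
   ⟨"p", b, Atom.i nc, Atom.s (outName oc), 2, 4⟩,
   ⟨"n", a, Atom.s (outName oc), Atom.s "gnd", 2, 4⟩,
   ⟨"n", b, Atom.s (outName oc), Atom.s "gnd", 2, 4⟩,
   ⟨"p", outName oc, Atom.s "vdd", Atom.s (outName (oc+1)), 2, 4⟩,
   ⟨"n", outName oc, Atom.s (outName (oc+1)), Atom.s "gnd", 2, 4⟩]

-- the six-gate template of '.'
def gatesDot (a b : String) (nc oc : Int) : List Gate :=
  [⟨"p", a, Atom.s "vdd", Atom.s (outName oc), 2, 4⟩,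
   ⟨"p", b, Atom.s "vdd", Atom.s (outName oc), 2, 4⟩,
   ⟨"n", a, Atom.s (outName oc), Atom.i nc, 2, 4⟩,
   ⟨"n", b, Atom.i nc, Atom.s "gnd", 2, 4⟩,
   ⟨"p", outName oc, Atom.s "vdd", Atom.s (outName (oc+1)), 2, 4⟩,
   ⟨"n", outName oc, Atom.s (outName (oc+1)), Atom.s "gnd", 2, 4⟩]

-- the two-gate template of '!'
def gatesNot (g : String) (oc : Int) : List Gate :=
  [⟨"p", g, Atom.s "vdd", Atom.s (outName (oc+1)), 2, 4⟩,
   ⟨"n", g, Atom.s (outName (oc+1)), Atom.s "gnd", 2, 4⟩]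

def atomStr : Atom → String
  | Atom.s s => s
  | Atom.i n => PySem.Int.toStr n

-- the final relabel-and-join of one row (fields 3 then 2 compared to the final node, then ' '.join + '\n')
def finishLine (tgt : String) (g : Gate) : String :=
  let g := if g.drain == Atom.s tgt then { g with drain := Atom.s "out" } else g
  let g := if g.source == Atom.s tgt then { g with source := Atom.s "out" } else g
  PySem.Str.join " " [g.typ, g.gate, atomStr g.source, atomStr g.drain,
                      PySem.Int.toStr g.len, PySem.Int.toStr g.wid] ++ "\n"

-- ===== PORT A =====
structure AState where
  stack : List String
  network : List Gate
  nc : Int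
  oc : Int
deriving DecidableEq, Repr

-- one iteration of A's for-loop (the three inner ifs in A's order);
-- where Python indexes stack[-2]/stack[-1] out of range it raises IndexError
-- (excluded by Pre_generate); the port leaves the state unchanged there.
def stepA (st : AState) (i : String) : AState :=
  if i == "+" || i == "!" || i == "." then
    let st1 :=
      if i == "+" then
        match PySem.List.pyGet? st.stack (-2), PySem.List.pyGet? st.stack (-1) with
        | some a, some b =>
          ⟨st.stack.dropLast.dropLast ++ [outName (st.oc + 1)],
           st.network ++ gatesPlus a b st.nc st.oc, st.nc + 1, st.oc + 2⟩
        | _, _ => st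
      else st
    let st2 :=
      if i == "." then
        match PySem.List.pyGet? st1.stack (-2), PySem.List.pyGet? st1.stack (-1) with
        | some a, some b =>
          ⟨st1.stack.dropLast.dropLast ++ [outName (st1.oc + 1)],
           st1.network ++ gatesDot a b st1.nc st1.oc, st1.nc + 1, st1.oc + 2⟩
        | _, _ => st1
      else st1
    if i == "!" then
      match PySem.List.pyGet? st2.stack (-1) with
      | some g =>
        ⟨st2.stack.dropLast ++ [outName (st2.oc + 1)],
         st2.network ++ gatesNot g st2.oc, st2.nc, st2.oc + 2⟩
      | none => st2
    else st2
  else ⟨st.stack ++ [i], st.network, st.nc, st.oc⟩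

def generate (post_exp : List String) : List String :=
  let st := post_exp.foldl stepA ⟨[], [], 1, 1⟩
  -- stack[0]; Python only reads it when network ≠ [], where the stack is nonempty
  let tgt := st.stack.headD ""
  st.network.map (finishLine tgt)

-- ===== PORT B =====
inductive BExpr
  | leaf : String → BExpr
  | notE : BExpr → BExpr
  | plusE : BExpr → BExpr → BExpr
  | dotE : BExpr → BExpr → BExpr
deriving DecidableEq, Repr

-- Source B's first loop: build the forest (head of the list = top of the stack);
-- on stack underflow Python's pop raises IndexError (excluded by Pre_generate).
def parseStep (stk : List BExpr) (t : String) : List BExpr :=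
  if t == "+" || t == "." then
    match stk with
    | b :: a :: rest => (if t == "+" then BExpr.plusE a b else BExpr.dotE a b) :: rest
    | _ => stk
  else if t == "!" then
    match stk with
    | a :: rest => BExpr.notE a :: rest
    | _ => stk
  else BExpr.leaf t :: stk

-- Source B's emit: post-order walk returning (gates, output name, node_counter, out_counter)
def emitE : BExpr → Int → Int → List Gate × String × Int × Int
  | BExpr.leaf s, nc, oc => ([], s, nc, oc)
  | BExpr.notE a, nc, oc =>
    let r := emitE a nc oc
    (r.1 ++ gatesNot r.2.1 r.2.2.2, outName (r.2.2.2 + 1), r.2.2.1, r.2.2.2 + 2)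
  | BExpr.plusE a b, nc, oc =>
    let r1 := emitE a nc oc
    let r2 := emitE b r1.2.2.1 r1.2.2.2
    (r1.1 ++ r2.1 ++ gatesPlus r1.2.1 r2.2.1 r2.2.2.1 r2.2.2.2,
     outName (r2.2.2.2 + 1), r2.2.2.1 + 1, r2.2.2.2 + 2)
  | BExpr.dotE a b, nc, oc =>
    let r1 := emitE a nc oc
    let r2 := emitE b r1.2.2.1 r1.2.2.2
    (r1.1 ++ r2.1 ++ gatesDot r1.2.1 r2.2.1 r2.2.2.1 r2.2.2.2,
     outName (r2.2.2.2 + 1), r2.2.2.1 + 1, r2.2.2.2 + 2)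

-- Source B's second loop: emit each tree of the forest in order, collecting names
def emitForest : List BExpr → Int → Int → List Gate × List String × Int × Int
  | [], nc, oc => ([], [], nc, oc)
  | e :: rest, nc, oc =>
    let r := emitE e nc oc
    let rs := emitForest rest r.2.2.1 r.2.2.2
    (r.1 ++ rs.1, r.2.1 :: rs.2.1, rs.2.2.1, rs.2.2.2)

def generate_alt (post_exp : List String) : List String :=
  let forest := (post_exp.foldl parseStep []).reverse
  let r := emitForest forest 1 1
  match r.1 with
  | [] => []
  | _ => r.1.map (finishLine (r.2.1.headD ""))

-- ===== PRECONDITION & SPEC =====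
-- stack depth after a prefix of tokens: operands push, '+'/'.' net-pop one, '!' is neutral
def pvDepth (ts : List String) : Int :=
  ts.foldl (fun d t => if t = "+" ∨ t = "." then d - 1 else if t = "!" then d else d + 1) 0

-- Pre_ excludes exactly the inputs on which Python A raises IndexError
-- (an operator token arriving with too few operands on the stack).
def Pre_generate (post_exp : List String) : Prop :=
  ∀ k, (h : k < post_exp.length) →
    (post_exp[k] = "+" ∨ post_exp[k] = "." → 2 ≤ pvDepth (post_exp.take k)) ∧
    (post_exp[k] = "!" → 1 ≤ pvDepth (post_exp.take k))
instance (post_exp : List String) : Decidable (Pre_generate post_exp) := by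
  unfold Pre_generate; infer_instance

def pvWitness_generate : List String := ["a", "b", "+"]

def Spec_generate (post_exp : List String) (out : List String) : Prop := out = generate_alt post_exp
instance (post_exp : List String) (out : List String) : Decidable (Spec_generate post_exp out) := by unfold Spec_generate; infer_instance

-- ===== CLAIM (what is proved, stated in full; the proofs are below) =====
def Claim_equal_generate : Prop := ∀ (post_exp : List String), Dom_generate post_exp → Pre_generate post_exp → Spec_generate post_exp (generate post_exp)

-- ===== LEMMAS AND PROOFS =====

-- A's state as the image of B's tree stack (emitting the forest bottom-of-stack first)
def absState (stk : List BExpr) : AState :=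
  let r := emitForest stk.reverse 1 1
  ⟨r.2.1, r.1, r.2.2.1, r.2.2.2⟩

theorem emitForest_append (xs ys : List BExpr) (nc oc : Int) :
    emitForest (xs ++ ys) nc oc =
      (let r1 := emitForest xs nc oc
       let r2 := emitForest ys r1.2.2.1 r1.2.2.2
       (r1.1 ++ r2.1, r1.2.1 ++ r2.2.1, r2.2.2.1, r2.2.2.2)) := by
  induction xs generalizing nc oc with
  | nil => simp [emitForest]
  | cons e rest ih => simp [emitForest, ih]

theorem emitForest_names_length (xs : List BExpr) (nc oc : Int) :
    (emitForest xs nc oc).2.1.length = xs.length := by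
  induction xs generalizing nc oc with
  | nil => simp [emitForest]
  | cons e rest ih => simp [emitForest, ih]

theorem abs_length (stk : List BExpr) : (absState stk).stack.length = stk.length := by
  simp [absState, emitForest_names_length]

theorem pyGet_pen (l : List String) (x y : String) :
    PySem.List.pyGet? (l ++ [x, y]) (-2) = some x := by
  rw [show l ++ [x, y] = (l ++ [x]) ++ [y] by simp]
  rw [PySem.List.pyGet?_neg_ofNat _ 2 (by omega) (by simp)]
  simp

theorem pyGet_last2 (l : List String) (x y : String) :
    PySem.List.pyGet? (l ++ [x, y]) (-1) = some y := by
  rw [show l ++ [x, y] = (l ++ [x]) ++ [y] by simp,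
    PySem.List.pyGet?_neg_one_append_singleton]

theorem stepA_plus (names : List String) (x y : String) (net : List Gate) (nc oc : Int) :
    stepA ⟨names ++ [x, y], net, nc, oc⟩ "+" =
      ⟨names ++ [outName (oc + 1)], net ++ gatesPlus x y nc oc, nc + 1, oc + 2⟩ := by
  simp [stepA, pyGet_pen, pyGet_last2]

theorem stepA_dot (names : List String) (x y : String) (net : List Gate) (nc oc : Int) :
    stepA ⟨names ++ [x, y], net, nc, oc⟩ "." =
      ⟨names ++ [outName (oc + 1)], net ++ gatesDot x y nc oc, nc + 1, oc + 2⟩ := by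
  simp [stepA, pyGet_pen, pyGet_last2]

theorem stepA_not (names : List String) (x : String) (net : List Gate) (nc oc : Int) :
    stepA ⟨names ++ [x], net, nc, oc⟩ "!" =
      ⟨names ++ [outName (oc + 1)], net ++ gatesNot x oc, nc, oc + 2⟩ := by
  simp [stepA, PySem.List.pyGet?_neg_one_append_singleton]

theorem stepA_operand (st : AState) (t : String)
    (hp : (t == "+") = false) (hd : (t == ".") = false) (hn : (t == "!") = false) :
    stepA st t = ⟨st.stack ++ [t], st.network, st.nc, st.oc⟩ := by
  simp [stepA, hp, hd, hn]

theorem stepA_bin_underflow (st : AState) (t : String) (h : st.stack.length < 2)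
    (ht : t = "+" ∨ t = ".") : stepA st t = st := by
  have h2 : PySem.List.pyGet? st.stack (-2) = none := by
    rw [PySem.List.pyGet?_eq_none_iff]
    simp [PySem.Raise.InRange]; omega
  have h1 : st.stack = [] → PySem.List.pyGet? st.stack (-1) = none := by
    intro he
    rw [PySem.List.pyGet?_eq_none_iff]
    simp [PySem.Raise.InRange, he]
  rcases ht with ht | ht <;> subst ht <;>
    cases hx : PySem.List.pyGet? st.stack (-1) <;> simp [stepA, h2, hx]

theorem stepA_not_underflow (st : AState) (h : st.stack = []) : stepA st "!" = st := by
  have h1 : PySem.List.pyGet? st.stack (-1) = none := by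
    rw [PySem.List.pyGet?_eq_none_iff]
    simp [PySem.Raise.InRange, h]
  simp [stepA, h1]

theorem abs_leaf (stk : List BExpr) (t : String) :
    absState (BExpr.leaf t :: stk) =
      ⟨(absState stk).stack ++ [t], (absState stk).network, (absState stk).nc, (absState stk).oc⟩ := by
  simp [absState, List.reverse_cons, emitForest_append, emitForest, emitE]

theorem abs_top1 (a : BExpr) (rest : List BExpr) :
    ∃ names x net nc oc,
      absState (a :: rest) = ⟨names ++ [x], net, nc, oc⟩ ∧
      absState (BExpr.notE a :: rest) =
        ⟨names ++ [outName (oc + 1)], net ++ gatesNot x oc, nc, oc + 2⟩ := by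
  refine ⟨(emitForest rest.reverse 1 1).2.1,
    (emitE a (emitForest rest.reverse 1 1).2.2.1 (emitForest rest.reverse 1 1).2.2.2).2.1,
    (emitForest rest.reverse 1 1).1 ++
      (emitE a (emitForest rest.reverse 1 1).2.2.1 (emitForest rest.reverse 1 1).2.2.2).1,
    (emitE a (emitForest rest.reverse 1 1).2.2.1 (emitForest rest.reverse 1 1).2.2.2).2.2.1,
    (emitE a (emitForest rest.reverse 1 1).2.2.1 (emitForest rest.reverse 1 1).2.2.2).2.2.2,
    ?_, ?_⟩ <;>
  simp [absState, List.reverse_cons, emitForest_append, emitForest, emitE, List.append_assoc]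

theorem abs_top2 (a b : BExpr) (rest : List BExpr) :
    ∃ names x y net nc oc,
      absState (b :: a :: rest) = ⟨names ++ [x, y], net, nc, oc⟩ ∧
      absState (BExpr.plusE a b :: rest) =
        ⟨names ++ [outName (oc + 1)], net ++ gatesPlus x y nc oc, nc + 1, oc + 2⟩ ∧
      absState (BExpr.dotE a b :: rest) =
        ⟨names ++ [outName (oc + 1)], net ++ gatesDot x y nc oc, nc + 1, oc + 2⟩ := by
  refine
    let R := emitForest rest.reverse 1 1
    let rA := emitE a R.2.2.1 R.2.2.2
    let rB := emitE b rA.2.2.1 rA.2.2.2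
    ⟨R.2.1, rA.2.1, rB.2.1, R.1 ++ rA.1 ++ rB.1, rB.2.2.1, rB.2.2.2, ?_, ?_, ?_⟩ <;>
  simp [R, rA, rB, absState, List.reverse_cons, emitForest_append, emitForest, emitE,
    List.append_assoc]

theorem stepA_abs (stk : List BExpr) (t : String) :
    stepA (absState stk) t = absState (parseStep stk t) := by
  by_cases hp : t = "+"
  · subst hp
    match stk with
    | [] => rw [stepA_bin_underflow _ _ (by simp [abs_length]) (Or.inl rfl)]; rfl
    | [a] => rw [stepA_bin_underflow _ _ (by simp [abs_length]) (Or.inl rfl)]; rfl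
    | b :: a :: rest =>
      obtain ⟨names, x, y, net, nc, oc, h1, h2, _⟩ := abs_top2 a b rest
      rw [show parseStep (b :: a :: rest) "+" = BExpr.plusE a b :: rest by simp [parseStep]]
      rw [h1, h2, stepA_plus]
  · by_cases hd : t = "."
    · subst hd
      match stk with
      | [] => rw [stepA_bin_underflow _ _ (by simp [abs_length]) (Or.inr rfl)]; rfl
      | [a] => rw [stepA_bin_underflow _ _ (by simp [abs_length]) (Or.inr rfl)]; rfl
      | b :: a :: rest =>
        obtain ⟨names, x, y, net, nc, oc, h1, _, h3⟩ := abs_top2 a b rest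
        rw [show parseStep (b :: a :: rest) "." = BExpr.dotE a b :: rest by simp [parseStep]]
        rw [h1, h3, stepA_dot]
    · by_cases hn : t = "!"
      · subst hn
        match stk with
        | [] =>
          rw [stepA_not_underflow _ (by
            have := abs_length ([] : List BExpr)
            exact List.eq_nil_of_length_eq_zero (by simpa using this))]
          rfl
        | a :: rest =>
          obtain ⟨names, x, net, nc, oc, h1, h2⟩ := abs_top1 a rest
          rw [show parseStep (a :: rest) "!" = BExpr.notE a :: rest by simp [parseStep]]
          rw [h1, h2, stepA_not]
      · have hp' : (t == "+") = false := by simp [hp]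
        have hd' : (t == ".") = false := by simp [hd]
        have hn' : (t == "!") = false := by simp [hn]
        rw [stepA_operand _ _ hp' hd' hn',
          show parseStep stk t = BExpr.leaf t :: stk by simp [parseStep, hp', hd', hn'],
          abs_leaf]

theorem foldl_abs (ts : List String) (stk : List BExpr) :
    ts.foldl stepA (absState stk) = absState (ts.foldl parseStep stk) := by
  induction ts generalizing stk with
  | nil => rfl
  | cons t rest ih => rw [List.foldl_cons, stepA_abs, List.foldl_cons, ih]

-- ===== VERDICT (by name: the statement is the Claim_ definition above) =====
theorem generate_spec : Claim_equal_generate := by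
  intro post_exp _ _
  unfold Spec_generate generate generate_alt
  rw [show (⟨[], [], 1, 1⟩ : AState) = absState [] from rfl, foldl_abs]
  simp only [absState]
  cases hnet : (emitForest (post_exp.foldl parseStep []).reverse 1 1).1 with
  | nil => simp
  | cons g gs => simp
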